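-- pv_equiv track=rewrite | github.com/batrakunal/nlp_ui | Carlo_ngrams_tool/chunking_bforce_plus_space_add.py | word_len_limit
-- ===== SOURCE A (Python) =====
-- def word_len_limit(text,word_len):
--     """
--
--     replace words with length less than wod_len from the text with space
--     Parameters
--     ----------
--     text : string
--         the raw text.
--     word_len : integer
--         the minimum length of words.
--
--     Returns
--     -------
--     the cleaned text.
--
--     """
--     start=-1
--     for ind in range(len(text)):
--         if(text[ind]==' ') & (start!=-1):
--             if(ind-start<word_len):
--                 text=text[:start]+(ind-start)*" "+text[ind:]
--             start=-1
--         elif (text[ind]!=' ') & (start==-1):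
--             start=ind
--     return(text)
-- ===== SOURCE B (Python) =====
-- def word_len_limit(text, word_len):
--     # Split on the literal space character; only words terminated by a space
--     # are blanked (the trailing token is kept), exactly reconstructing spacing.
--     *init, last = text.split(' ')
--     blanked = [' ' * len(w) if len(w) < word_len else w for w in init]
--     return ' '.join(blanked + [last])
-- ===== Notes on version B (the rewrite author's own statement) =====
-- stated objective: simpler
-- what changed: Replaces A's index scan with repeated whole-string slice surgery by a split(' ')/blank-short-tokens/join pipeline that leaves the trailing token (no terminating space) untouched.
import Mathlib
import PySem

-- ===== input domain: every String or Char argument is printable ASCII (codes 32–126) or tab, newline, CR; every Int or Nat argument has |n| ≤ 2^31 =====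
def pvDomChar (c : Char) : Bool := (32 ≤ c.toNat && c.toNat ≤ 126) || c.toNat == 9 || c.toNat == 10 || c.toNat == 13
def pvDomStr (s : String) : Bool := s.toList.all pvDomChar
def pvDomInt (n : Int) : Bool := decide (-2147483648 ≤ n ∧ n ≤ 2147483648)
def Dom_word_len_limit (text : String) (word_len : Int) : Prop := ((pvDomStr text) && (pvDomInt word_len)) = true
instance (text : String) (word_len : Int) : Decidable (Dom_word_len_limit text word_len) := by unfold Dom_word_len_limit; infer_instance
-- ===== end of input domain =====

-- ===== PORT A =====
-- B blanks short space-terminated words via split(' ')/join instead of A's index scan with slice surgery (objective: simpler).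
-- One loop step of A: state (text, start), text[ind] read with the in-range default form pyGetD.
def stepA (word_len : Int) (st : List Char × Int) (ind : Int) : List Char × Int :=
  if (PySem.List.pyGetD st.1 ind ' ' == ' ') && (st.2 != -1) then
    (if ind - st.2 < word_len then
        PySem.List.slice st.1 none (some st.2) ++ List.replicate (ind - st.2).toNat ' '
          ++ PySem.List.slice st.1 (some ind) none
      else st.1, -1)
  else if (PySem.List.pyGetD st.1 ind ' ' != ' ') && (st.2 == -1) then (st.1, ind)
  else st

def word_len_limit (text : String) (word_len : Int) : String :=
  String.mk
    (((PySem.List.pyRange 0 (PySem.List.len text.toList) 1).foldl (stepA word_len)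
        (text.toList, -1)).1)

-- ===== PORT B =====
-- ' ' * len(w) if len(w) < word_len else w
def blankShort (word_len : Int) (w : List Char) : List Char :=
  if PySem.List.len w < word_len then List.replicate w.length ' ' else w

def word_len_limit_alt (text : String) (word_len : Int) : String :=
  let parts := PySem.Chars.splitOn text.toList [' ']
  -- *init, last = text.split(' ')   (split always yields a nonempty list)
  let last := parts.getLast?.getD []
  String.mk (PySem.Chars.join [' '] (parts.dropLast.map (blankShort word_len) ++ [last]))

-- ===== PRECONDITION & SPEC =====
def Spec_word_len_limit (text : String) (word_len : Int) (out : String) : Prop := out = word_len_limit_alt text word_len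
instance (text : String) (word_len : Int) (out : String) : Decidable (Spec_word_len_limit text word_len out) := by unfold Spec_word_len_limit; infer_instance

-- ===== CLAIM (what is proved, stated in full; the proofs are below) =====
def Claim_equal_word_len_limit : Prop := ∀ (text : String) (word_len : Int), Dom_word_len_limit text word_len → Spec_word_len_limit text word_len (word_len_limit text word_len)

-- ===== LEMMAS AND PROOFS =====

-- splitOn.go unfolding equations (sep = [' '])
lemma go_zero (sep l cur : List Char) (acc : List (List Char)) :
    PySem.Chars.splitOn.go sep 0 l cur acc = ((cur.reverse ++ l) :: acc).reverse := by
  rw [PySem.Chars.splitOn.go]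

lemma go_nil (sep : List Char) (fuel : Nat) (cur : List Char) (acc : List (List Char)) :
    PySem.Chars.splitOn.go sep (fuel + 1) [] cur acc = (cur.reverse :: acc).reverse := by
  rw [PySem.Chars.splitOn.go]; omega

lemma go_cons (sep : List Char) (fuel : Nat) (c : Char) (rest cur : List Char) (acc : List (List Char)) :
    PySem.Chars.splitOn.go sep (fuel + 1) (c :: rest) cur acc =
      if sep.isPrefixOf (c :: rest) then
        PySem.Chars.splitOn.go sep fuel (List.drop sep.length (c :: rest)) [] (cur.reverse :: acc)
      else PySem.Chars.splitOn.go sep fuel rest (c :: cur) acc := by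
  rw [PySem.Chars.splitOn.go]

lemma go_acc (fuel : Nat) : ∀ (l cur : List Char) (acc : List (List Char)),
    PySem.Chars.splitOn.go [' '] fuel l cur acc =
      acc.reverse ++ PySem.Chars.splitOn.go [' '] fuel l cur [] := by
  induction fuel with
  | zero => intro l cur acc; rw [go_zero, go_zero]; simp
  | succ fuel ih =>
    intro l cur acc
    cases l with
    | nil => rw [go_nil, go_nil]; simp
    | cons c rest =>
      rw [go_cons, go_cons]
      by_cases h : ([' '] : List Char).isPrefixOf (c :: rest)
      · simp only [h, if_true]
        rw [ih _ _ (cur.reverse :: acc), ih _ _ [cur.reverse]]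
        simp
      · simp only [h, if_false]
        exact ih _ _ acc

lemma go_nospace : ∀ (w : List Char) (fuel : Nat) (cur : List Char) (acc : List (List Char)),
    (∀ c ∈ w, c ≠ ' ') → w.length < fuel →
    PySem.Chars.splitOn.go [' '] fuel w cur acc = ((cur.reverse ++ w) :: acc).reverse := by
  intro w
  induction w with
  | nil =>
    intro fuel cur acc _ hf
    obtain ⟨f, rfl⟩ : ∃ g, fuel = g + 1 := ⟨fuel - 1, by omega⟩
    rw [go_nil]; simp
  | cons c rest ih =>
    intro fuel cur acc hw hf
    obtain ⟨f, rfl⟩ : ∃ g, fuel = g + 1 := ⟨fuel - 1, by omega⟩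
    rw [go_cons]
    have hc : c ≠ ' ' := hw c (by simp)
    have hp : ([' '] : List Char).isPrefixOf (c :: rest) = false := by
      simp [List.isPrefixOf]; exact fun h => (hc h.symm).elim
    rw [hp]
    simp only [Bool.false_eq_true, if_false]
    rw [ih f (c :: cur) acc (fun x hx => hw x (by simp [hx])) (by simp at hf ⊢; omega)]
    simp

lemma go_space : ∀ (w : List Char) (fuel : Nat) (r cur : List Char) (acc : List (List Char)),
    (∀ c ∈ w, c ≠ ' ') → w.length < fuel →
    PySem.Chars.splitOn.go [' '] fuel (w ++ ' ' :: r) cur acc =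
      PySem.Chars.splitOn.go [' '] (fuel - (w.length + 1)) r [] ((cur.reverse ++ w) :: acc) := by
  intro w
  induction w with
  | nil =>
    intro fuel r cur acc _ hf
    obtain ⟨f, rfl⟩ : ∃ g, fuel = g + 1 := ⟨fuel - 1, by omega⟩
    rw [show (([] : List Char) ++ ' ' :: r) = ' ' :: r from rfl, go_cons]
    have hp : ([' '] : List Char).isPrefixOf (' ' :: r) = true := by simp [List.isPrefixOf]
    rw [hp]
    simp
  | cons c rest ih =>
    intro fuel r cur acc hw hf
    obtain ⟨f, rfl⟩ : ∃ g, fuel = g + 1 := ⟨fuel - 1, by omega⟩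
    rw [List.cons_append, go_cons]
    have hc : c ≠ ' ' := hw c (by simp)
    have hp : ([' '] : List Char).isPrefixOf (c :: (rest ++ ' ' :: r)) = false := by
      simp [List.isPrefixOf]; exact fun h => (hc h.symm).elim
    rw [hp]
    simp only [Bool.false_eq_true, if_false]
    rw [ih f r (c :: cur) acc (fun x hx => hw x (by simp [hx])) (by simp at hf ⊢; omega)]
    have h1 : f + 1 - ((c :: rest).length + 1) = f - (rest.length + 1) := by simp
    have h2 : (c :: cur).reverse ++ rest = cur.reverse ++ c :: rest := by simp
    rw [h1, h2]

lemma splitOn_nospace (w : List Char) (hw : ∀ c ∈ w, c ≠ ' ') :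
    PySem.Chars.splitOn w [' '] = [w] := by
  unfold PySem.Chars.splitOn
  rw [go_nospace w (w.length + 1) [] [] hw (by omega)]
  simp

lemma splitOn_cons (w r : List Char) (hw : ∀ c ∈ w, c ≠ ' ') :
    PySem.Chars.splitOn (w ++ ' ' :: r) [' '] = w :: PySem.Chars.splitOn r [' '] := by
  unfold PySem.Chars.splitOn
  rw [go_space w _ r [] [] hw (by simp)]
  have harith : (w ++ ' ' :: r).length + 1 - (w.length + 1) = r.length + 1 := by simp
  rw [harith, go_acc]
  simp

lemma splitOn_ne_nil : ∀ (fuel : Nat) (l cur : List Char) (acc : List (List Char)),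
    PySem.Chars.splitOn.go [' '] fuel l cur acc ≠ [] := by
  intro fuel
  induction fuel with
  | zero => intro l cur acc; rw [go_zero]; simp
  | succ f ih =>
    intro l cur acc
    cases l with
    | nil => rw [go_nil]; simp
    | cons c rest =>
      rw [go_cons]
      by_cases h : ([' '] : List Char).isPrefixOf (c :: rest) <;> simp [h, ih]

lemma getD_mid (pre : List Char) (x : Char) (l : List Char) (d : Char) :
    PySem.List.pyGetD (pre ++ x :: l) (pre.length : Int) d = x := by
  simp [PySem.List.pyGetD_natCast, List.getD, List.getElem?_append_right]

lemma scanA (wl : Int) : ∀ (u pre r : List Char) (s : Nat), (∀ c ∈ u, c ≠ ' ') →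
    (PySem.List.pyRange (pre.length : Int) ((pre.length : Int) + u.length + 1) 1).foldl
        (stepA wl) (pre ++ u ++ ' ' :: r, (s : Int)) =
      ((if ((pre.length : Int) + u.length) - s < wl
          then (pre ++ u ++ ' ' :: r).take s
                ++ List.replicate (((pre.length : Int) + u.length) - s).toNat ' ' ++ ' ' :: r
          else pre ++ u ++ ' ' :: r), -1) := by
  intro u
  induction u with
  | nil =>
    intro pre r s _
    rw [PySem.List.pyRange_one_cons (by omega)]
    rw [show ((pre.length : Int) + (List.length (α := Char) []) + 1) = (pre.length : Int) + 1 by simp]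
    rw [show (PySem.List.pyRange ((pre.length : Int) + 1) ((pre.length : Int) + 1)) = [] by simp [pysem]]
    simp only [List.foldl_cons, List.foldl_nil]
    rw [show pre ++ ([] : List Char) ++ ' ' :: r = pre ++ ' ' :: r by simp]
    have hstep : stepA wl (pre ++ ' ' :: r, (s : Int)) (pre.length : Int) =
        ((if (pre.length : Int) - s < wl
            then (pre ++ ' ' :: r).take s
                  ++ List.replicate ((pre.length : Int) - s).toNat ' ' ++ ' ' :: r
            else pre ++ ' ' :: r), -1) := by
      unfold stepA
      rw [getD_mid pre ' ' r ' ']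
      have hs : ((s : Int) != -1) = true := by simp
      simp only [hs, BEq.rfl, Bool.true_and, if_true]
      rw [PySem.List.slice_to _ (by omega), PySem.List.slice_from _ (by omega)]
      simp only [Int.toNat_natCast, List.drop_left' rfl]
    rw [hstep]
    simp
  | cons c u' ih =>
    intro pre r s hw
    rw [PySem.List.pyRange_one_cons (by push_cast; omega)]
    simp only [List.foldl_cons]
    have hstep : stepA wl (pre ++ (c :: u') ++ ' ' :: r, (s : Int)) (pre.length : Int)
        = (pre ++ (c :: u') ++ ' ' :: r, (s : Int)) := by
      unfold stepA
      have hg : PySem.List.pyGetD (pre ++ (c :: u') ++ ' ' :: r) (pre.length : Int) ' ' = c := by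
        rw [show pre ++ (c :: u') ++ ' ' :: r = pre ++ c :: (u' ++ ' ' :: r) by simp]
        exact getD_mid pre c _ ' '
      have hc : c ≠ ' ' := hw c (by simp)
      have hs2 : ((s : Int) == -1) = false := by simp
      simp [hg, hc, hs2]
    rw [hstep]
    have hre : pre ++ (c :: u') ++ ' ' :: r = (pre ++ [c]) ++ u' ++ ' ' :: r := by simp
    have hlen : ((pre ++ [c]).length : Int) = (pre.length : Int) + 1 := by simp
    have := ih (pre ++ [c]) r s (fun x hx => hw x (by simp [hx]))
    rw [hlen] at this
    rw [hre]
    rw [show (pre.length : Int) + (c :: u').length + 1 = ((pre.length : Int) + 1) + u'.length + 1 by push_cast [List.length_cons]; omega]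
    rw [this]
    rw [show ((pre.length : Int) + 1 + u'.length) = ((pre.length : Int) + (c :: u').length) by push_cast [List.length_cons]; omega]

lemma tokenA (wl : Int) (done w r : List Char) (hw : ∀ c ∈ w, c ≠ ' ') :
    (PySem.List.pyRange (done.length : Int) ((done.length : Int) + w.length + 1) 1).foldl
        (stepA wl) (done ++ w ++ ' ' :: r, -1) =
      (done ++ blankShort wl w ++ ' ' :: r, -1) := by
  cases w with
  | nil =>
    rw [PySem.List.pyRange_one_cons (by omega)]
    rw [show (done.length : Int) + (List.length (α := Char) []) + 1 = (done.length : Int) + 1 by simp]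
    rw [show PySem.List.pyRange ((done.length : Int) + 1) ((done.length : Int) + 1) = [] by simp [pysem]]
    simp only [List.foldl_cons, List.foldl_nil]
    rw [show done ++ ([] : List Char) ++ ' ' :: r = done ++ ' ' :: r by simp]
    have hstep : stepA wl (done ++ ' ' :: r, -1) (done.length : Int) = (done ++ ' ' :: r, -1) := by
      unfold stepA
      rw [getD_mid done ' ' r ' ']
      simp
    rw [hstep]
    simp [blankShort]
  | cons c w' =>
    rw [PySem.List.pyRange_one_cons (by push_cast [List.length_cons]; omega)]
    simp only [List.foldl_cons]
    have hstep : stepA wl (done ++ (c :: w') ++ ' ' :: r, -1) (done.length : Int)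
        = (done ++ (c :: w') ++ ' ' :: r, (done.length : Int)) := by
      unfold stepA
      have hg : PySem.List.pyGetD (done ++ (c :: w') ++ ' ' :: r) (done.length : Int) ' ' = c := by
        rw [show done ++ (c :: w') ++ ' ' :: r = done ++ c :: (w' ++ ' ' :: r) by simp]
        exact getD_mid done c _ ' '
      have hc : c ≠ ' ' := hw c (by simp)
      simp [hg, hc]
    rw [hstep]
    have hre : done ++ (c :: w') ++ ' ' :: r = (done ++ [c]) ++ w' ++ ' ' :: r := by simp
    rw [hre]
    have := scanA wl w' (done ++ [c]) r done.length (fun x hx => hw x (by simp [hx]))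
    rw [show ((done ++ [c]).length : Int) = (done.length : Int) + 1 by simp] at this
    rw [show (done.length : Int) + (c :: w').length + 1 = ((done.length : Int) + 1) + w'.length + 1 by push_cast [List.length_cons]; omega]
    rw [this]
    have hcount : ((done.length : Int) + 1 + w'.length) - done.length = ((c :: w').length : Int) := by
      push_cast [List.length_cons]; omega
    rw [hcount]
    have htake : ((done ++ [c]) ++ w' ++ ' ' :: r).take done.length = done := by
      rw [show (done ++ [c]) ++ w' ++ ' ' :: r = done ++ ([c] ++ (w' ++ ' ' :: r)) by simp]
      exact List.take_left' rfl
    rw [htake]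
    unfold blankShort
    rw [PySem.List.len_eq]
    split <;> simp

lemma tailA (wl : Int) : ∀ (u pre : List Char) (s : Int), (∀ c ∈ u, c ≠ ' ') →
    ((PySem.List.pyRange (pre.length : Int) ((pre.length : Int) + u.length) 1).foldl
        (stepA wl) (pre ++ u, s)).1 = pre ++ u := by
  intro u
  induction u with
  | nil =>
    intro pre s _
    rw [show (pre.length : Int) + (List.length (α := Char) []) = (pre.length : Int) by simp]
    rw [show PySem.List.pyRange (pre.length : Int) (pre.length : Int) = [] by simp [pysem]]
    simp
  | cons c u' ih =>
    intro pre s hw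
    rw [PySem.List.pyRange_one_cons (by simp only [List.length_cons]; push_cast; omega)]
    simp only [List.foldl_cons]
    have hg : PySem.List.pyGetD (pre ++ c :: u', s).1 (pre.length : Int) ' ' = c := getD_mid pre c u' ' '
    have hc : c ≠ ' ' := hw c (by simp)
    have hre : pre ++ c :: u' = (pre ++ [c]) ++ u' := by simp
    have hlen : ((pre ++ [c]).length : Int) = (pre.length : Int) + 1 := by simp
    have harg : (pre.length : Int) + (c :: u').length = ((pre ++ [c]).length : Int) + u'.length := by
      simp only [List.length_cons, List.length_append, List.length_nil]; push_cast; omega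
    by_cases hs : s = -1
    · have hstep : stepA wl (pre ++ c :: u', s) (pre.length : Int) = (pre ++ c :: u', (pre.length : Int)) := by
        unfold stepA; simp [hg, hc, hs]
      rw [hstep, harg, hre, show (pre.length : Int) + 1 = ((pre ++ [c]).length : Int) from hlen.symm]
      exact ih (pre ++ [c]) _ (fun x hx => hw x (by simp [hx]))
    · have hstep : stepA wl (pre ++ c :: u', s) (pre.length : Int) = (pre ++ c :: u', s) := by
        unfold stepA; simp [hg, hc, hs]
      rw [hstep, harg, hre, show (pre.length : Int) + 1 = ((pre ++ [c]).length : Int) from hlen.symm]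
      exact ih (pre ++ [c]) _ (fun x hx => hw x (by simp [hx]))

lemma splitOn_ne_nil' (l : List Char) : PySem.Chars.splitOn l [' '] ≠ [] := by
  unfold PySem.Chars.splitOn; exact splitOn_ne_nil _ _ _ _

lemma length_blankShort (wl : Int) (w : List Char) : (blankShort wl w).length = w.length := by
  unfold blankShort; split <;> simp

lemma mainA (wl : Int) : ∀ (n : Nat) (rest done : List Char), rest.length ≤ n →
    ((PySem.List.pyRange (done.length : Int) ((done.length : Int) + rest.length) 1).foldl
        (stepA wl) (done ++ rest, -1)).1 =
      done ++ PySem.Chars.join [' ']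
        ((PySem.Chars.splitOn rest [' ']).dropLast.map (blankShort wl)
          ++ [(PySem.Chars.splitOn rest [' ']).getLast?.getD []]) := by
  intro n
  induction n with
  | zero =>
    intro rest done h
    have h0 : rest = [] := List.eq_nil_of_length_eq_zero (by omega)
    subst h0
    rw [splitOn_nospace [] (by simp)]
    rw [show (done.length : Int) + (List.length (α := Char) []) = (done.length : Int) by simp]
    rw [show PySem.List.pyRange (done.length : Int) (done.length : Int) = [] by simp [pysem]]
    simp [PySem.Chars.join_singleton]
  | succ n ih =>
    intro rest done hn
    by_cases hsp : ' ' ∈ rest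
    · -- rest = w ++ ' ' :: r, with w space-free
      have hd : rest.dropWhile (· != ' ') ≠ [] := by
        rw [Ne, List.dropWhile_eq_nil_iff]
        push_neg
        exact ⟨' ', hsp, by simp⟩
      cases hdd : rest.dropWhile (· != ' ') with
      | nil => exact absurd hdd hd
      | cons d r =>
        have hdv : d = ' ' := by
          have h2 := List.head_dropWhile_not (· != ' ') hd
          simp only [hdd, List.head_cons] at h2
          simpa using h2
        subst hdv
        have hrest : rest = rest.takeWhile (· != ' ') ++ ' ' :: r := by
          conv_lhs => rw [← List.takeWhile_append_dropWhile (p := (· != ' ')) (l := rest)]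
          rw [hdd]
        set w := rest.takeWhile (· != ' ') with hwdef
        have hwns : ∀ c ∈ w, c ≠ ' ' := by
          intro c hc
          have := List.mem_takeWhile_imp hc
          simpa using this
        have hlen : rest.length = w.length + 1 + r.length := by
          rw [hrest]; simp; omega
        have hsplit : PySem.List.pyRange (done.length : Int) ((done.length : Int) + rest.length) =
            PySem.List.pyRange (done.length : Int) ((done.length : Int) + w.length + 1) ++
            PySem.List.pyRange ((done.length : Int) + w.length + 1) ((done.length : Int) + rest.length) :=
          PySem.List.pyRange_one_append _ _ _ (by omega) (by push_cast [hlen]; omega)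
        rw [hsplit, List.foldl_append]
        rw [show done ++ rest = done ++ w ++ ' ' :: r by rw [hrest]; simp]
        rw [tokenA wl done w r hwns]
        have hstate : done ++ blankShort wl w ++ ' ' :: r = (done ++ blankShort wl w ++ [' ']) ++ r := by
          simp
        have hdlen : ((done ++ blankShort wl w ++ [' ']).length : Int) = (done.length : Int) + w.length + 1 := by
          simp only [List.length_append, List.length_cons, List.length_nil, length_blankShort]
          push_cast; omega
        have := ih r (done ++ blankShort wl w ++ [' ']) (by omega)
        rw [hdlen] at this
        rw [hstate, show (done.length : Int) + rest.length = ((done.length : Int) + w.length + 1) + r.length by push_cast [hlen]; omega]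
        rw [this]
        -- right-hand sides
        rw [hrest, splitOn_cons w r hwns]
        have hne : PySem.Chars.splitOn r [' '] ≠ [] := splitOn_ne_nil' r
        rw [List.dropLast_cons_of_ne_nil hne]
        have hlast : (w :: PySem.Chars.splitOn r [' ']).getLast? = (PySem.Chars.splitOn r [' ']).getLast? := by
          cases hps : PySem.Chars.splitOn r [' '] with
          | nil => exact absurd hps hne
          | cons q qs => rw [List.getLast?_cons_cons]
        rw [hlast]
        cases hq : (PySem.Chars.splitOn r [' ']).dropLast.map (blankShort wl)
            ++ [(PySem.Chars.splitOn r [' ']).getLast?.getD []] with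
        | nil => exact absurd hq (by simp)
        | cons q qs =>
          rw [List.map_cons, List.cons_append, hq, PySem.Chars.join_cons_cons]
          simp
    · -- no space in rest: text unchanged, single token kept
      have hwns : ∀ c ∈ rest, c ≠ ' ' := fun c hc h => hsp (h ▸ hc)
      rw [splitOn_nospace rest hwns]
      rw [tailA wl rest done (-1) hwns]
      simp [PySem.Chars.join_singleton]

-- ===== VERDICT (by name: the statement is the Claim_ definition above) =====
theorem word_len_limit_spec : Claim_equal_word_len_limit := by
  intro text wl _
  unfold Spec_word_len_limit word_len_limit word_len_limit_alt
  have h := mainA wl text.toList.length text.toList [] (le_refl _)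
  simp only [List.length_nil, Nat.cast_zero, zero_add, List.nil_append] at h
  rw [PySem.List.len_eq, h]
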